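-- pv_equiv track=rewrite | github.com/aflynt/wordle | lib_solve.py | make_yellow_string
-- ===== SOURCE A (Python) =====
-- def make_yellow_string(yellow_list):
--   spots = [
--       [],
--       [],
--       [],
--       [],
--       [],
--   ]
--
--   # push chars into spots
--   for i in range(len(spots)):
--     for idx, char in yellow_list:
--       if idx == i:
--         spots[i].append(char)
--
--   # turn spot lists into strings
--   for i in range(len(spots)):
--     spot_i_list = spots[i]
--     spot_i_str = ''.join(spot_i_list)
--     if(len(spot_i_str) == 0):
--       spot_i_str = '.'
--     else:
--       spot_i_str = '['+ spot_i_str + ']'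
--     spots[i] = spot_i_str
--
--   return ''.join(spots)
-- ===== SOURCE B (Python) =====
-- def make_yellow_string(yellow_list):
--   spots = [[], [], [], [], []]
--   # single bucketing pass; out-of-range indices are skipped (A never places them either)
--   for idx, char in yellow_list:
--     if 0 <= idx < 5:
--       spots[idx].append(char)
--   parts = []
--   for bucket in spots:
--     s = ''.join(bucket)
--     parts.append('.' if len(s) == 0 else '[' + s + ']')
--   return ''.join(parts)
-- ===== Notes on version B (the rewrite author's own statement) =====
-- stated objective: simpler
-- what changed: Replaces A's five repeated scans of yellow_list (one per position) by a single bucketing pass that appends each char to spots[idx] guarded by 0 <= idx < 5, then formats the five buckets.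
import Mathlib
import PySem

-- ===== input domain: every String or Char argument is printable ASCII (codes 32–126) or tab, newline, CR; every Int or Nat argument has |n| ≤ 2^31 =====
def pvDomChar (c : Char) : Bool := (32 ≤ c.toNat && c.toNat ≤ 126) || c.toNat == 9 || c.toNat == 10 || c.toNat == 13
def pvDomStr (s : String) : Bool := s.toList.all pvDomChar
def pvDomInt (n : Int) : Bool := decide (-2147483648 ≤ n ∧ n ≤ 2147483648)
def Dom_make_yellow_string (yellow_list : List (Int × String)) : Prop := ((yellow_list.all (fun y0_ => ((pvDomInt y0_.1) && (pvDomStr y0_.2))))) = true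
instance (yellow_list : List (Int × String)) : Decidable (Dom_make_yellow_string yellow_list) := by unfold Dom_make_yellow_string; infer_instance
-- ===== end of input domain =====

-- B replaces A's five repeated scans of yellow_list (one per position) by a single
-- bucketing pass over yellow_list; objective: simpler.

-- ===== PORT A =====
-- inner loop of A's first pass: for (idx,char) in yellow_list: if idx == i: spots[i].append(char)
def pvA_bucket (yellow_list : List (Int × String)) (i : Int) : List String :=
  yellow_list.foldl (fun acc p => if p.1 == i then acc ++ [p.2] else acc) []

-- A's second pass, per slot: join, then '.' or '[…]'
def pvA_fmt (b : List String) : String :=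
  let s := PySem.Str.join "" b
  if PySem.Str.len s == 0 then "." else PySem.Str.join "" ["[", s, "]"]

def make_yellow_string (yellow_list : List (Int × String)) : String :=
  PySem.Str.join ""
    ((List.range 5).map (fun i => pvA_fmt (pvA_bucket yellow_list (Int.ofNat i))))

-- ===== PORT B =====
-- B's single bucketing step: if 0 <= idx < 5: spots[idx].append(char)
def pvB_step (sp : List (List String)) (p : Int × String) : List (List String) :=
  if 0 ≤ p.1 ∧ p.1 < 5 then sp.set p.1.toNat (sp.getD p.1.toNat [] ++ [p.2]) else sp

def make_yellow_string_alt (yellow_list : List (Int × String)) : String :=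
  let spots := yellow_list.foldl pvB_step [[], [], [], [], []]
  PySem.Str.join ""
    (spots.map (fun b =>
      let s := PySem.Str.join "" b
      if PySem.Str.len s == 0 then "." else PySem.Str.join "" ["[", s, "]"]))

-- ===== PRECONDITION & SPEC =====
def Spec_make_yellow_string (yellow_list : List (Int × String)) (out : String) : Prop := out = make_yellow_string_alt yellow_list
instance (yellow_list : List (Int × String)) (out : String) : Decidable (Spec_make_yellow_string yellow_list out) := by unfold Spec_make_yellow_string; infer_instance

-- ===== CLAIM (what is proved, stated in full; the proofs are below) =====
def Claim_equal_make_yellow_string : Prop := ∀ (yellow_list : List (Int × String)), Dom_make_yellow_string yellow_list → Spec_make_yellow_string yellow_list (make_yellow_string yellow_list)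

-- ===== LEMMAS AND PROOFS =====

-- chars destined for slot i, in order
def pvM (yellow_list : List (Int × String)) (i : Int) : List String :=
  (yellow_list.filter (fun p => p.1 == i)).map Prod.snd

theorem pvM_cons (p : Int × String) (t : List (Int × String)) (i : Int) :
    pvM (p :: t) i = (if p.1 == i then [p.2] else []) ++ pvM t i := by
  by_cases h : p.1 = i <;> simp [pvM, h]

theorem pvA_bucket_eq (yellow_list : List (Int × String)) (i : Int) :
    pvA_bucket yellow_list i = pvM yellow_list i := by
  simpa [pvA_bucket, pvM] using
    PySem.List.foldl_append_if (l := yellow_list) (p := fun p => p.1 == i)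
      (f := Prod.snd) (acc := ([] : List String))

theorem pvB_fold_eq (yellow_list : List (Int × String)) (a0 a1 a2 a3 a4 : List String) :
    yellow_list.foldl pvB_step [a0, a1, a2, a3, a4] =
      [a0 ++ pvM yellow_list 0, a1 ++ pvM yellow_list 1, a2 ++ pvM yellow_list 2,
       a3 ++ pvM yellow_list 3, a4 ++ pvM yellow_list 4] := by
  induction yellow_list generalizing a0 a1 a2 a3 a4 with
  | nil => simp [pvM]
  | cons p t ih =>
    obtain ⟨i, c⟩ := p
    by_cases h : 0 ≤ i ∧ i < 5
    · obtain ⟨hl, hr⟩ := h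
      interval_cases i <;>
        simp [List.foldl_cons, pvB_step, pvB_step, ih, pvM_cons]
    · have h0 : i ≠ 0 := by omega
      have h1 : i ≠ 1 := by omega
      have h2 : i ≠ 2 := by omega
      have h3 : i ≠ 3 := by omega
      have h4 : i ≠ 4 := by omega
      simp [List.foldl_cons, pvB_step, h, ih, pvM_cons, h0, h1, h2, h3, h4]

-- ===== VERDICT (by name: the statement is the Claim_ definition above) =====
theorem make_yellow_string_spec : Claim_equal_make_yellow_string := by
  intro yl _
  unfold Spec_make_yellow_string make_yellow_string make_yellow_string_alt
  rw [pvB_fold_eq]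
  simp [List.range_succ, pvA_bucket_eq, pvA_fmt]
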